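-- pv_equiv track=rewrite | github.com/icustomerai/tag_identification | util/utilities.py | social_handle_extractor
-- ===== SOURCE A (Python) =====
-- def social_handle_extractor(urls):
--     social_handle_result = {}
--
--     for each_link in urls:
--         if 'facebook.com' in each_link:
--             # social_handle_result['facebook']= True
--             social_handle_result['facebook']= each_link
--
--         if 'twitter.com' in each_link:
--             # social_handle_result['twitter']= True
--             social_handle_result['twitter']= each_link
--
--         if 'linkedin.com' in each_link:
--             # social_handle_result['linkedin']= True
--             social_handle_result['linkedin']= each_link
--
--         if 'instagram.com' in each_link:
--             # social_handle_result['instagram']= True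
--             social_handle_result['instagram']= each_link
--
--     if not social_handle_result.get('facebook'):
--         social_handle_result['facebook']= ''
--
--     if not social_handle_result.get('twitter'):
--         social_handle_result['twitter']= ''
--
--     if not social_handle_result.get('linkedin'):
--         social_handle_result['linkedin']= ''
--
--     if not social_handle_result.get('instagram'):
--         social_handle_result['instagram']= ''
--
--     return social_handle_result
-- ===== SOURCE B (Python) =====
-- def social_handle_extractor(urls):
--     platforms = {'facebook': 'facebook.com', 'twitter': 'twitter.com',
--                  'linkedin': 'linkedin.com', 'instagram': 'instagram.com'}
--     urls = list(urls)
--     return {name: next((u for u in reversed(urls) if domain in u), '')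
--             for name, domain in platforms.items()}
-- ===== Notes on version B (the rewrite author's own statement) =====
-- stated objective: idiomatic
-- what changed: Replaces A's single forward pass that mutates one dict through four unrolled substring branches plus a four-step falsy-fill chain by a dict comprehension that, per platform, scans the urls backwards and takes the first match (defaulting to ''); Pre_ excludes url lists whose platforms first match out of the canonical facebook-twitter-linkedin-instagram order, where A's dict key insertion order is accidental (as dicts the two results are always equal).
import Mathlib
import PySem

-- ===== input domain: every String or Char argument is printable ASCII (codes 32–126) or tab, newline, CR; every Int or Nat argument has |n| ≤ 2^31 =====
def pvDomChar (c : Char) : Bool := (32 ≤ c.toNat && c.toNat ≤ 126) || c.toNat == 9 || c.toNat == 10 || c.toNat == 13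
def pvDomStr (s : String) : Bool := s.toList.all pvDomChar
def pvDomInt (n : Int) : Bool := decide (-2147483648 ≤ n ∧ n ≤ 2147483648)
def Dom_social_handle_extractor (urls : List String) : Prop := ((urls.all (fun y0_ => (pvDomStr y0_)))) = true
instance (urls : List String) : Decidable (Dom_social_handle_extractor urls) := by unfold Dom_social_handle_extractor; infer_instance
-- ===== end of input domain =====

-- B replaces A's single forward pass mutating a dict through four unrolled branches (plus a
-- falsy-fill chain) by a per-platform backward scan taking the first match; as dicts the two
-- results are always equal, Pre_ pins down where the key order also agrees.

-- ===== PORT A =====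
-- A-side helpers: the loop body and the fill chain of A, named for the proofs.
def sheAStep (d : PySem.Dict String String) (each_link : String) : PySem.Dict String String :=
  let d := if PySem.Str.isIn "facebook.com" each_link then d.insert "facebook" each_link else d
  let d := if PySem.Str.isIn "twitter.com" each_link then d.insert "twitter" each_link else d
  let d := if PySem.Str.isIn "linkedin.com" each_link then d.insert "linkedin" each_link else d
  let d := if PySem.Str.isIn "instagram.com" each_link then d.insert "instagram" each_link else d
  d

-- 'if not d.get(k)' is falsy on both a missing key and '': ported as (get? k).getD "" = "".
def sheAFill (d : PySem.Dict String String) : PySem.Dict String String :=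
  let d := if (d.get? "facebook").getD "" = "" then d.insert "facebook" "" else d
  let d := if (d.get? "twitter").getD "" = "" then d.insert "twitter" "" else d
  let d := if (d.get? "linkedin").getD "" = "" then d.insert "linkedin" "" else d
  let d := if (d.get? "instagram").getD "" = "" then d.insert "instagram" "" else d
  d

def social_handle_extractor (urls : List String) : List (String × String) :=
  (sheAFill (urls.foldl sheAStep PySem.Dict.empty)).items

-- ===== PORT B =====
def sheAltPlatforms : List (String × String) :=
  [("facebook", "facebook.com"), ("twitter", "twitter.com"),
   ("linkedin", "linkedin.com"), ("instagram", "instagram.com")]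

-- Port of Source B: a dict comprehension over the platform map (distinct keys, so the dict is the
-- association list in platform order); next((u for u in reversed(urls) if dom in u), '') is
-- urls.reverse.find? with default ''.
def social_handle_extractor_alt (urls : List String) : List (String × String) :=
  sheAltPlatforms.map (fun p =>
    (p.1, ((urls.reverse.find? (fun u => PySem.Str.isIn p.2 u)).getD "")))

-- ===== PRECONDITION & SPEC =====
-- index of the first url containing d (urls.length if none)
def sheFi (urls : List String) (d : String) : Nat :=
  urls.findIdx (fun u => PySem.Str.isIn d u)

-- Pre_ excludes url lists whose platforms first match out of the canonical
-- facebook-twitter-linkedin-instagram order: there A's dict key insertion order (first-match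
-- order, unmatched platforms appended) is accidental, while B always uses the canonical order;
-- as unordered dicts the two results are equal on every input.
def Pre_social_handle_extractor (urls : List String) : Prop :=
  sheFi urls "facebook.com" ≤ sheFi urls "twitter.com" ∧
  sheFi urls "twitter.com" ≤ sheFi urls "linkedin.com" ∧
  sheFi urls "linkedin.com" ≤ sheFi urls "instagram.com"
instance (urls : List String) : Decidable (Pre_social_handle_extractor urls) := by
  unfold Pre_social_handle_extractor; infer_instance

def pvWitness_social_handle_extractor : List String := ["facebook.com/icai", "nothing here"]

def Spec_social_handle_extractor (urls : List String) (out : List (String × String)) : Prop := out = social_handle_extractor_alt urls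
instance (urls : List String) (out : List (String × String)) : Decidable (Spec_social_handle_extractor urls out) := by unfold Spec_social_handle_extractor; infer_instance

-- ===== CLAIM (what is proved, stated in full; the proofs are below) =====
def Claim_equal_social_handle_extractor : Prop := ∀ (urls : List String), Dom_social_handle_extractor urls → Pre_social_handle_extractor urls → Spec_social_handle_extractor urls (social_handle_extractor urls)

-- ===== LEMMAS AND PROOFS =====

-- generic step over a platform list, for induction
def sheStepD (u : String) (ps : List (String × String)) (d : PySem.Dict String String) : PySem.Dict String String :=
  ps.foldl (fun d p => if PySem.Str.isIn p.2 u then d.insert p.1 u else d) d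

-- order of first appearance of the platform keys, as A's loop builds it
def sheStepO (u : String) (ps : List (String × String)) (acc : List String) : List String :=
  ps.foldl (fun acc p =>
    if PySem.Str.isIn p.2 u && !(acc.contains p.1) then acc ++ [p.1] else acc) acc

def sheMatched (u : String) (ps : List (String × String)) : List String :=
  (ps.filter (fun p => PySem.Str.isIn p.2 u)).map (·.1)

def sheOrd (urls : List String) : List String :=
  urls.foldl (fun acc u => sheStepO u sheAltPlatforms acc) []

def sheDomOf (n : String) : String := (PySem.Dict.ofList sheAltPlatforms).getD n ""

def sheLastv (n : String) (urls : List String) : String :=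
  ((urls.filter (fun u => PySem.Str.isIn (sheDomOf n) u)).getLast?).getD ""

def sheNames : List String := ["facebook", "twitter", "linkedin", "instagram"]

def sheRank (n : String) : Nat := sheNames.idxOf n

def sheKey (urls : List String) (n : String) : Nat :=
  4 * sheFi urls (sheDomOf n) + sheRank n

def sheFillA (ns : List String) (d : PySem.Dict String String) : PySem.Dict String String :=
  ns.foldl (fun d k => if (d.get? k).getD "" = "" then d.insert k "" else d) d

theorem she_items_insert (d : PySem.Dict String String) (ord : List String) (f : String → String)
    (h : d.items = ord.map (fun n => (n, f n))) (name v : String) :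
    (d.insert name v).items =
      (if name ∈ ord then ord else ord ++ [name]).map
        (fun n => (n, if n = name then v else f n)) := by
  have hk : d.keys = ord := by
    simp [PySem.Dict.keys, h, Function.comp_def]
  have hc : d.contains name = decide (name ∈ ord) := by
    rw [PySem.Dict.contains_eq_decide_mem_keys, hk]
  by_cases hm : name ∈ ord
  · rw [PySem.Dict.items_insert_of_contains d v (by simp [hc, hm]), h]
    rw [if_pos hm, List.map_map]
    apply List.map_congr_left
    intro n hn
    by_cases hne : n = name <;> simp [hne]
  · rw [PySem.Dict.items_insert_of_not_contains d v (by simp [hc, hm]), h]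
    rw [if_neg hm, List.map_append]
    congr 1
    · apply List.map_congr_left
      intro n hn
      have hne : n ≠ name := fun e => hm (e ▸ hn)
      simp [hne]
    · simp

theorem she_step_items (u : String) (ps : List (String × String)) :
    ∀ (d : PySem.Dict String String) (ord : List String) (f : String → String),
    d.items = ord.map (fun n => (n, f n)) →
    (sheStepD u ps d).items =
      (sheStepO u ps ord).map (fun n => (n, if n ∈ sheMatched u ps then u else f n)) := by
  induction ps with
  | nil =>
    intro d ord f h
    simpa [sheStepD, sheStepO, sheMatched] using h
  | cons p rest ih =>
    intro d ord f h
    by_cases hp : PySem.Chars.isIn p.2.toList u.toList = true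
    · have hD : sheStepD u (p :: rest) d = sheStepD u rest (d.insert p.1 u) := by
        simp [sheStepD, hp]
      have hO : sheStepO u (p :: rest) ord
          = sheStepO u rest (if p.1 ∈ ord then ord else ord ++ [p.1]) := by
        by_cases hm : p.1 ∈ ord <;>
          simp [sheStepO, hp, List.contains_eq_mem, hm]
      have hM : sheMatched u (p :: rest) = p.1 :: sheMatched u rest := by
        simp [sheMatched, hp]
      rw [hD, hO, hM,
        ih (d.insert p.1 u) (if p.1 ∈ ord then ord else ord ++ [p.1])
          (fun n => if n = p.1 then u else f n) (she_items_insert d ord f h p.1 u)]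
      apply List.map_congr_left
      intro n hn
      by_cases hne : n = p.1 <;> by_cases hr : n ∈ sheMatched u rest <;> simp [hne, hr]
    · have hD : sheStepD u (p :: rest) d = sheStepD u rest d := by
        simp [sheStepD, hp]
      have hO : sheStepO u (p :: rest) ord = sheStepO u rest ord := by
        simp [sheStepO, hp]
      have hM : sheMatched u (p :: rest) = sheMatched u rest := by
        simp [sheMatched, hp]
      rw [hD, hO, hM, ih d ord f h]

theorem she_mem_stepO (u n : String) (ps : List (String × String)) :
    ∀ acc, n ∈ sheStepO u ps acc ↔ n ∈ acc ∨ n ∈ sheMatched u ps := by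
  induction ps with
  | nil => simp [sheStepO, sheMatched]
  | cons p rest ih =>
    intro acc
    by_cases hp : PySem.Chars.isIn p.2.toList u.toList = true
    · have hM : sheMatched u (p :: rest) = p.1 :: sheMatched u rest := by
        simp [sheMatched, hp]
      by_cases hm : p.1 ∈ acc
      · rw [show sheStepO u (p :: rest) acc = sheStepO u rest acc from by
          simp [sheStepO, hp, List.contains_eq_mem, hm], ih acc, hM]
        simp only [List.mem_cons]
        constructor
        · rintro (h | h)
          · exact Or.inl h
          · exact Or.inr (Or.inr h)
        · rintro (h | h | h)
          · exact Or.inl h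
          · exact Or.inl (h ▸ hm)
          · exact Or.inr h
      · rw [show sheStepO u (p :: rest) acc = sheStepO u rest (acc ++ [p.1]) from by
          simp [sheStepO, hp, List.contains_eq_mem, hm], ih (acc ++ [p.1]), hM]
        simp only [List.mem_append, List.mem_cons]
        tauto
    · have hM : sheMatched u (p :: rest) = sheMatched u rest := by
        simp [sheMatched, hp]
      rw [show sheStepO u (p :: rest) acc = sheStepO u rest acc from by
        simp [sheStepO, hp], ih acc, hM]

theorem she_stepO_decomp (u : String) :
    ∀ (ps : List (String × String)) (acc : List String), (ps.map (·.1)).Nodup →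
    sheStepO u ps acc
      = acc ++ (ps.filter (fun p => PySem.Str.isIn p.2 u && !(acc.contains p.1))).map (·.1) := by
  intro ps
  induction ps with
  | nil => intro acc _; simp [sheStepO]
  | cons p rest ih =>
    intro acc hnd
    simp only [List.map_cons, List.nodup_cons] at hnd
    rw [List.filter_cons]
    by_cases hc : (PySem.Str.isIn p.2 u && !(acc.contains p.1)) = true
    · rw [if_pos hc]
      have e1 : sheStepO u (p :: rest) acc = sheStepO u rest (acc ++ [p.1]) := by
        simp only [sheStepO, List.foldl_cons, if_pos hc]
      rw [e1, ih (acc ++ [p.1]) hnd.2]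
      have hfc : rest.filter (fun q => PySem.Str.isIn q.2 u && !((acc ++ [p.1]).contains q.1))
          = rest.filter (fun q => PySem.Str.isIn q.2 u && !(acc.contains q.1)) := by
        apply List.filter_congr
        intro q hq
        have hne : q.1 ≠ p.1 := fun e => hnd.1 (e ▸ List.mem_map_of_mem hq)
        simp [List.contains_eq_mem, hne]
      rw [hfc, List.map_cons]
      simp [List.append_assoc]
    · rw [if_neg hc]
      have e1 : sheStepO u (p :: rest) acc = sheStepO u rest acc := by
        simp only [sheStepO, List.foldl_cons, if_neg hc]
      rw [e1, ih acc hnd.2]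

theorem she_nodup_stepO (u : String) (ps : List (String × String)) :
    ∀ acc : List String, acc.Nodup → (sheStepO u ps acc).Nodup := by
  induction ps with
  | nil => intro acc h; simpa [sheStepO] using h
  | cons p rest ih =>
    intro acc h
    by_cases hp : PySem.Chars.isIn p.2.toList u.toList = true
    · by_cases hm : p.1 ∈ acc
      · rw [show sheStepO u (p :: rest) acc = sheStepO u rest acc from by
          simp [sheStepO, hp, List.contains_eq_mem, hm]]
        exact ih acc h
      · rw [show sheStepO u (p :: rest) acc = sheStepO u rest (acc ++ [p.1]) from by
          simp [sheStepO, hp, List.contains_eq_mem, hm]]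
        exact ih (acc ++ [p.1]) (by
          refine List.Nodup.append h (List.nodup_singleton _) ?_
          intro a ha hb
          simp only [List.mem_singleton] at hb
          exact hm (hb ▸ ha))
    · rw [show sheStepO u (p :: rest) acc = sheStepO u rest acc from by simp [sheStepO, hp]]
      exact ih acc h

theorem she_ord_append (urls : List String) (u : String) :
    sheOrd (urls ++ [u]) = sheStepO u sheAltPlatforms (sheOrd urls) := by
  simp [sheOrd, List.foldl_append]

theorem she_ord_nodup (urls : List String) : (sheOrd urls).Nodup := by
  induction urls using List.reverseRecOn with
  | nil => simp [sheOrd]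
  | append_singleton urls u ih =>
    rw [she_ord_append]
    exact she_nodup_stepO u sheAltPlatforms _ ih

theorem she_mem_ord (n : String) (urls : List String) :
    n ∈ sheOrd urls ↔ ∃ u ∈ urls, n ∈ sheMatched u sheAltPlatforms := by
  induction urls using List.reverseRecOn with
  | nil => simp [sheOrd]
  | append_singleton urls u ih =>
    rw [she_ord_append, she_mem_stepO, ih]
    constructor
    · rintro (⟨w, hw, hn⟩ | hn)
      · exact ⟨w, by simp [hw], hn⟩
      · exact ⟨u, by simp, hn⟩
    · rintro ⟨w, hw, hn⟩
      rcases List.mem_append.1 hw with hw | hw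
      · exact Or.inl ⟨w, hw, hn⟩
      · simp only [List.mem_singleton] at hw
        exact Or.inr (hw ▸ hn)

theorem she_domOf_eq :
    sheDomOf "facebook" = "facebook.com" ∧ sheDomOf "twitter" = "twitter.com" ∧
      sheDomOf "linkedin" = "linkedin.com" ∧ sheDomOf "instagram" = "instagram.com" := by
  decide

theorem she_domOf_platforms : ∀ p ∈ sheAltPlatforms, sheDomOf p.1 = p.2 := by decide

theorem she_matched_names (u n : String) (h : n ∈ sheMatched u sheAltPlatforms) : n ∈ sheNames := by
  simp only [sheMatched, sheAltPlatforms, List.mem_map] at h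
  obtain ⟨p, hp, rfl⟩ := h
  have := List.mem_of_mem_filter hp
  simp only [List.mem_cons, List.not_mem_nil, or_false] at this
  rcases this with rfl | rfl | rfl | rfl <;> simp [sheNames]

theorem she_matched_iff (u n : String) (hn : n ∈ sheNames) :
    n ∈ sheMatched u sheAltPlatforms ↔ PySem.Str.isIn (sheDomOf n) u = true := by
  simp only [sheNames, List.mem_cons, List.not_mem_nil, or_false] at hn
  rcases hn with rfl | rfl | rfl | rfl <;>
    simp [sheMatched, sheAltPlatforms, List.mem_map, List.mem_filter,
      she_domOf_eq.1, she_domOf_eq.2.1, she_domOf_eq.2.2.1, she_domOf_eq.2.2.2]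

theorem she_domOf_ne (n : String) (hn : n ∈ sheNames) : sheDomOf n ≠ "" := by
  simp only [sheNames, List.mem_cons, List.not_mem_nil, or_false] at hn
  rcases hn with rfl | rfl | rfl | rfl <;>
    simp [she_domOf_eq.1, she_domOf_eq.2.1, she_domOf_eq.2.2.1, she_domOf_eq.2.2.2]

theorem she_isIn_ne_empty (sub s : String) (h : PySem.Str.isIn sub s = true) (hs : sub ≠ "") : s ≠ "" := by
  intro rfl
  rw [PySem.Str.isIn_iff_infix] at h
  have : sub.toList = [] := List.sublist_nil.mp (by simpa using h.sublist)
  exact hs (String.toList_eq_nil_iff.mp this)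

theorem she_dictA_items (urls : List String) :
    (urls.foldl sheAStep PySem.Dict.empty).items
      = (sheOrd urls).map (fun n => (n, sheLastv n urls)) := by
  induction urls using List.reverseRecOn with
  | nil => simp [sheOrd, PySem.Dict.empty]
  | append_singleton urls u ih =>
    rw [List.foldl_append, List.foldl_cons, List.foldl_nil]
    have hstep : ∀ d, sheAStep d u = sheStepD u sheAltPlatforms d := fun d => rfl
    rw [hstep, she_step_items u sheAltPlatforms _ _ _ ih, she_ord_append]
    apply List.map_congr_left
    intro n hn
    have hnames : n ∈ sheNames := by
      rcases (she_mem_stepO u n sheAltPlatforms (sheOrd urls)).1 hn with h | h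
      · obtain ⟨w, _, hw⟩ := (she_mem_ord n urls).1 h
        exact she_matched_names w n hw
      · exact she_matched_names u n h
    simp only [she_matched_iff u n hnames]
    by_cases hmm : PySem.Chars.isIn (sheDomOf n).toList u.toList = true
    · simp [sheLastv, List.filter_append, hmm]
    · simp [sheLastv, List.filter_append, hmm]

theorem she_lastv_ne (n : String) (urls : List String) (hn : n ∈ sheOrd urls) :
    sheLastv n urls ≠ "" := by
  obtain ⟨w, hw, hmw⟩ := (she_mem_ord n urls).1 hn
  have hnames := she_matched_names w n hmw
  have hiw : PySem.Str.isIn (sheDomOf n) w = true := (she_matched_iff w n hnames).1 hmw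
  have hmem : w ∈ urls.filter (fun u => PySem.Str.isIn (sheDomOf n) u) :=
    List.mem_filter.2 ⟨hw, hiw⟩
  have hne : urls.filter (fun u => PySem.Str.isIn (sheDomOf n) u) ≠ [] :=
    List.ne_nil_of_mem hmem
  have hlast := List.getLast?_eq_some_getLast hne
  have hvmem := List.getLast_mem hne
  have hvin : PySem.Str.isIn (sheDomOf n)
      ((urls.filter (fun u => PySem.Str.isIn (sheDomOf n) u)).getLast hne) = true :=
    (List.mem_filter.1 hvmem).2
  have hvne := she_isIn_ne_empty _ _ hvin (she_domOf_ne n hnames)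
  simp only [sheLastv, hlast, Option.getD_some]
  exact hvne

-- n ∈ sheOrd urls ↔ the first index of n's domain is inside urls
theorem she_mem_ord_iff_fi (n : String) (urls : List String) (hn : n ∈ sheNames) :
    n ∈ sheOrd urls ↔ sheFi urls (sheDomOf n) < urls.length := by
  rw [she_mem_ord, sheFi, List.findIdx_lt_length]
  constructor
  · rintro ⟨u, hu, hm⟩
    exact ⟨u, hu, (she_matched_iff u n hn).1 hm⟩
  · rintro ⟨u, hu, hm⟩
    exact ⟨u, hu, (she_matched_iff u n hn).2 hm⟩

theorem she_rank_lt (n : String) (hn : n ∈ sheNames) : sheRank n < 4 := by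
  simp only [sheNames, List.mem_cons, List.not_mem_nil, or_false] at hn
  rcases hn with rfl | rfl | rfl | rfl <;> decide

theorem she_names_rank_pairwise : sheNames.Pairwise (fun a b => sheRank a < sheRank b) := by
  decide

theorem she_ord_names (n : String) (urls : List String) (hn : n ∈ sheOrd urls) : n ∈ sheNames := by
  obtain ⟨w, _, hw⟩ := (she_mem_ord n urls).1 hn
  exact she_matched_names w n hw

-- first index is stable under appending when already found
theorem she_fi_append_found (urls : List String) (u d : String)
    (h : sheFi urls d < urls.length) : sheFi (urls ++ [u]) d = sheFi urls d := by
  unfold sheFi at h ⊢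
  rw [List.findIdx_append, if_pos h]

theorem she_fi_append_new (urls : List String) (u d : String)
    (hnot : ¬ sheFi urls d < urls.length) (hu : PySem.Str.isIn d u = true) :
    sheFi (urls ++ [u]) d = urls.length := by
  have hu' : PySem.Chars.isIn d.toList u.toList = true := hu
  unfold sheFi at hnot ⊢
  rw [List.findIdx_append, if_neg hnot]
  simp [List.findIdx_cons, hu']

-- A's key-insertion order is strictly increasing under (4 * first-match-index + platform rank)
theorem she_ord_pairwise (urls : List String) :
    (sheOrd urls).Pairwise (fun a b => sheKey urls a < sheKey urls b) := by
  induction urls using List.reverseRecOn with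
  | nil => simp [sheOrd]
  | append_singleton urls u ih =>
    rw [she_ord_append,
      she_stepO_decomp u sheAltPlatforms (sheOrd urls) (by decide)]
    rw [List.pairwise_append]
    set new := (sheAltPlatforms.filter
      (fun p => PySem.Str.isIn p.2 u && !((sheOrd urls).contains p.1))).map (·.1) with hnew
    have hmemnew : ∀ n ∈ new, n ∈ sheNames ∧ PySem.Str.isIn (sheDomOf n) u = true
        ∧ ¬ n ∈ sheOrd urls := by
      intro n hn
      rw [hnew] at hn
      obtain ⟨p, hp, rfl⟩ := List.mem_map.1 hn
      have hpm := List.mem_of_mem_filter hp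
      have hpf := List.of_mem_filter hp
      simp only [Bool.and_eq_true, Bool.not_eq_true', List.contains_eq_mem,
        decide_eq_false_iff_not] at hpf
      refine ⟨?_, ?_, hpf.2⟩
      · exact (show ∀ q ∈ sheAltPlatforms, q.1 ∈ sheNames by decide) p hpm
      · rw [she_domOf_platforms p hpm]; exact hpf.1
    have hkeyold : ∀ n ∈ sheOrd urls, sheKey (urls ++ [u]) n = sheKey urls n := by
      intro n hn
      have := (she_mem_ord_iff_fi n urls (she_ord_names n urls hn)).1 hn
      simp [sheKey, she_fi_append_found urls u _ this]
    have hkeynew : ∀ n ∈ new, sheKey (urls ++ [u]) n = 4 * urls.length + sheRank n := by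
      intro n hn
      obtain ⟨hn1, hn2, hn3⟩ := hmemnew n hn
      have hfi : ¬ sheFi urls (sheDomOf n) < urls.length := fun h =>
        hn3 ((she_mem_ord_iff_fi n urls hn1).2 h)
      simp [sheKey, she_fi_append_new urls u _ hfi hn2]
    refine ⟨?_, ?_, ?_⟩
    · refine List.Pairwise.imp_of_mem ?_ ih
      intro a b ha hb hr
      rw [hkeyold a ha, hkeyold b hb]; exact hr
    · have hsub : new.Sublist sheNames := by
        have : sheNames = sheAltPlatforms.map (·.1) := by decide
        rw [this, hnew]
        exact List.Sublist.map _ List.filter_sublist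
      have hpr : new.Pairwise (fun a b => sheRank a < sheRank b) :=
        List.Pairwise.sublist hsub she_names_rank_pairwise
      refine List.Pairwise.imp_of_mem ?_ hpr
      intro a b ha hb hr
      rw [hkeynew a ha, hkeynew b hb]; omega
    · intro a ha b hb
      have h1 := (she_mem_ord_iff_fi a urls (she_ord_names a urls ha)).1 ha
      have h2 := she_rank_lt a (she_ord_names a urls ha)
      rw [hkeyold a ha, hkeynew b hb]
      simp only [sheKey]
      omega

-- generic: two strictly key-sorted lists with the same members are equal
theorem she_eq_of_key_sorted (f : String → Nat) :
    ∀ (l₁ l₂ : List String), l₁.Pairwise (fun a b => f a < f b) →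
      l₂.Pairwise (fun a b => f a < f b) → (∀ x, x ∈ l₁ ↔ x ∈ l₂) → l₁ = l₂ := by
  intro l₁
  induction l₁ with
  | nil =>
    intro l₂ _ _ hm
    cases l₂ with
    | nil => rfl
    | cons b t => exact absurd ((hm b).2 (by simp)) (by simp)
  | cons a t ih =>
    intro l₂ h₁ h₂ hm
    cases l₂ with
    | nil => exact absurd ((hm a).1 (by simp)) (by simp)
    | cons b t₂ =>
      have hab : a = b := by
        rcases List.mem_cons.1 ((hm a).1 (by simp)) with h | h
        · exact h
        · exfalso
          have hba : f b < f a := (List.pairwise_cons.1 h₂).1 a h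
          rcases List.mem_cons.1 ((hm b).2 (by simp)) with h' | h'
          · exact absurd (h' ▸ hba) (lt_irrefl _)
          · exact absurd (lt_trans ((List.pairwise_cons.1 h₁).1 b h') hba) (lt_irrefl _)
      subst hab
      have hmt : ∀ x, x ∈ t ↔ x ∈ t₂ := by
        intro x
        constructor
        · intro hx
          rcases List.mem_cons.1 ((hm x).1 (List.mem_cons_of_mem _ hx)) with h | h
          · exact absurd (h ▸ (List.pairwise_cons.1 h₁).1 x hx) (lt_irrefl _)
          · exact h
        · intro hx
          rcases List.mem_cons.1 ((hm x).2 (List.mem_cons_of_mem _ hx)) with h | h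
          · exact absurd (h ▸ (List.pairwise_cons.1 h₂).1 x hx) (lt_irrefl _)
          · exact h
      rw [ih t₂ (List.pairwise_cons.1 h₁).2 (List.pairwise_cons.1 h₂).2 hmt]

-- the fill chain appends '' entries for the missing keys, in order
theorem she_fillA_items (ns : List String) :
    ∀ d : PySem.Dict String String, ns.Nodup →
      (∀ (v : String), ∀ k ∈ ns, d.get? k = some v → v ≠ "") →
      (sheFillA ns d).items
        = d.items ++ (ns.filter (fun k => !(d.contains k))).map (fun k => (k, "")) := by
  induction ns with
  | nil => intro d _ _; simp [sheFillA]
  | cons k rest ih =>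
    intro d hnd h
    cases hg : d.get? k with
    | none =>
      have hcont : d.contains k = false := by
        rw [PySem.Dict.contains_eq_isSome_get?, hg]; rfl
      have e1 : sheFillA (k :: rest) d = sheFillA rest (d.insert k "") := by
        simp [sheFillA, hg]
      rw [e1, ih (d.insert k "") (List.Nodup.of_cons hnd) ?hv]
      case hv =>
        intro v k' hk' hgv
        have hne : k' ≠ k := fun e => (List.nodup_cons.1 hnd).1 (e ▸ hk')
        exact h v k' (List.mem_cons_of_mem _ hk')
          (by rwa [PySem.Dict.get?_insert_of_ne d _ hne] at hgv)
      have hitems : (d.insert k "").items = d.items ++ [(k, "")] :=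
        PySem.Dict.items_insert_of_not_contains d "" (by simp [hcont])
      have hfc : rest.filter (fun k' => !((d.insert k "").contains k'))
          = rest.filter (fun k' => !(d.contains k')) := by
        apply List.filter_congr
        intro k' hk'
        have hne : k' ≠ k := fun e => (List.nodup_cons.1 hnd).1 (e ▸ hk')
        rw [PySem.Dict.contains_insert]
        simp [hne]
      rw [hitems, hfc]
      simp [List.filter_cons, hcont]
    | some v =>
      have hv : v ≠ "" := h v k (List.mem_cons_self) hg
      have hcont : d.contains k = true := by
        rw [PySem.Dict.contains_eq_isSome_get?, hg]; rfl
      have e1 : sheFillA (k :: rest) d = sheFillA rest d := by simp [sheFillA, hg, hv]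
      rw [e1, ih d (List.Nodup.of_cons hnd)
        (fun v' k' hk' => h v' k' (List.mem_cons_of_mem _ hk'))]
      simp [List.filter_cons, hcont]

-- backward scan = last element of the forward filter
theorem she_find_reverse (p : String → Bool) (l : List String) :
    l.reverse.find? p = (l.filter p).getLast? := by
  induction l using List.reverseRecOn with
  | nil => simp
  | append_singleton l a ih =>
    rw [List.reverse_append, List.filter_append,
      show ([a].reverse : List String) ++ l.reverse = a :: l.reverse from by simp]
    by_cases hp : p a = true
    · rw [List.find?_cons_of_pos hp]
      simp [List.filter_cons, hp, List.getLast?_append]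
    · rw [List.find?_cons_of_neg hp, ih]
      simp [List.filter_cons, hp, List.getLast?_append]

-- ===== VERDICT (by name: the statement is the Claim_ definition above) =====
set_option maxHeartbeats 1000000 in
theorem social_handle_extractor_spec : Claim_equal_social_handle_extractor := by
  intro urls _ hpre
  obtain ⟨hp1, hp2, hp3⟩ := hpre
  unfold Spec_social_handle_extractor social_handle_extractor social_handle_extractor_alt
  set ord := sheOrd urls with hordeq
  have hAitems := she_dictA_items urls
  set d := urls.foldl sheAStep PySem.Dict.empty with hd
  have hkeysA : d.keys = ord := by
    rw [hordeq]
    simp [PySem.Dict.keys, hAitems, Function.comp_def]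
  have hcont : ∀ k, d.contains k = decide (k ∈ ord) := by
    intro k
    rw [PySem.Dict.contains_eq_decide_mem_keys, hkeysA]
  have hnodK : d.keys.Nodup := by rw [hkeysA]; exact she_ord_nodup urls
  have hval : ∀ (v : String), ∀ k ∈ sheNames, d.get? k = some v → v ≠ "" := by
    intro v k _ hg
    have hk : k ∈ d.keys := by
      by_contra hnk
      rw [(PySem.Dict.get?_eq_none_iff_not_mem_keys _ k).2 hnk] at hg
      cases hg
    have hitems : (k, sheLastv k urls) ∈ d.items := by
      rw [hAitems]
      exact List.mem_map.2 ⟨k, hordeq ▸ hkeysA ▸ hk, rfl⟩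
    have hgk := PySem.Dict.get?_of_mem_items _ hitems hnodK
    rw [hgk] at hg
    have hveq : sheLastv k urls = v := Option.some_inj.mp hg
    rw [← hveq]
    exact she_lastv_ne k urls (hordeq ▸ hkeysA ▸ hk)
  have hfillA : sheAFill d = sheFillA sheNames d := by
    simp only [sheAFill, sheFillA, sheNames, List.foldl_cons, List.foldl_nil]
  rw [hfillA, she_fillA_items sheNames d (by decide) hval, hAitems]
  set missing := sheNames.filter (fun k => !(d.contains k)) with hmiss
  -- the combined key list equals the canonical name list
  have hkeyord : ord ++ missing = sheNames := by
    apply she_eq_of_key_sorted (sheKey urls)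
    · rw [List.pairwise_append]
      refine ⟨she_ord_pairwise urls, ?_, ?_⟩
      · have hsub : missing.Sublist sheNames := List.filter_sublist
        have hpr : missing.Pairwise (fun a b => sheRank a < sheRank b) :=
          List.Pairwise.sublist hsub she_names_rank_pairwise
        refine List.Pairwise.imp_of_mem ?_ hpr
        intro a b ha hb hr
        have han : a ∈ sheNames := List.mem_of_mem_filter ha
        have hbn : b ∈ sheNames := List.mem_of_mem_filter hb
        have hano : ¬ a ∈ ord := by
          have := List.of_mem_filter ha
          simp only [hcont, Bool.not_eq_true', decide_eq_false_iff_not] at this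
          exact this
        have hbno : ¬ b ∈ ord := by
          have := List.of_mem_filter hb
          simp only [hcont, Bool.not_eq_true', decide_eq_false_iff_not] at this
          exact this
        have hfa : sheFi urls (sheDomOf a) = urls.length := by
          have := mt (she_mem_ord_iff_fi a urls han).2 hano
          have hle := List.findIdx_le_length (p := fun u => PySem.Str.isIn (sheDomOf a) u) (xs := urls)
          simp only [sheFi] at *
          omega
        have hfb : sheFi urls (sheDomOf b) = urls.length := by
          have := mt (she_mem_ord_iff_fi b urls hbn).2 hbno
          have hle := List.findIdx_le_length (p := fun u => PySem.Str.isIn (sheDomOf b) u) (xs := urls)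
          simp only [sheFi] at *
          omega
        simp only [sheKey, hfa, hfb]
        omega
      · intro a ha b hb
        have han := she_ord_names a urls ha
        have hbn : b ∈ sheNames := List.mem_of_mem_filter hb
        have h1 := (she_mem_ord_iff_fi a urls han).1 ha
        have h2 := she_rank_lt a han
        have hbno : ¬ b ∈ ord := by
          have := List.of_mem_filter hb
          simp only [hcont, Bool.not_eq_true', decide_eq_false_iff_not] at this
          exact this
        have hfb : sheFi urls (sheDomOf b) = urls.length := by
          have := mt (she_mem_ord_iff_fi b urls hbn).2 hbno
          have hle := List.findIdx_le_length (p := fun u => PySem.Str.isIn (sheDomOf b) u) (xs := urls)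
          simp only [sheFi] at *
          omega
        simp only [sheKey, hfb]
        omega
    · -- canonical names are key-sorted under Pre_
      have e0 : sheKey urls "facebook" = 4 * sheFi urls "facebook.com" + 0 := by
        simp [sheKey, she_domOf_eq.1]; decide
      have e1 : sheKey urls "twitter" = 4 * sheFi urls "twitter.com" + 1 := by
        simp [sheKey, she_domOf_eq.2.1]; decide
      have e2 : sheKey urls "linkedin" = 4 * sheFi urls "linkedin.com" + 2 := by
        simp [sheKey, she_domOf_eq.2.2.1]; decide
      have e3 : sheKey urls "instagram" = 4 * sheFi urls "instagram.com" + 3 := by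
        simp [sheKey, she_domOf_eq.2.2.2]; decide
      show List.Pairwise _ ["facebook", "twitter", "linkedin", "instagram"]
      refine List.Pairwise.cons ?_ (List.Pairwise.cons ?_ (List.Pairwise.cons ?_
        (List.pairwise_singleton _ _)))
      · intro b hb
        rcases List.mem_cons.1 hb with rfl | hb
        · rw [e0, e1]; omega
        rcases List.mem_cons.1 hb with rfl | hb
        · rw [e0, e2]; omega
        rcases List.mem_cons.1 hb with rfl | hb
        · rw [e0, e3]; omega
        · cases hb
      · intro b hb
        rcases List.mem_cons.1 hb with rfl | hb
        · rw [e1, e2]; omega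
        rcases List.mem_cons.1 hb with rfl | hb
        · rw [e1, e3]; omega
        · cases hb
      · intro b hb
        rcases List.mem_cons.1 hb with rfl | hb
        · rw [e2, e3]; omega
        · cases hb
    · intro x
      simp only [List.mem_append, hmiss, List.mem_filter, hcont,
        Bool.not_eq_true', decide_eq_false_iff_not]
      constructor
      · rintro (h | h)
        · exact she_ord_names x urls h
        · exact h.1
      · intro hx
        by_cases hxo : x ∈ ord
        · exact Or.inl hxo
        · exact Or.inr ⟨hx, hxo⟩
  -- both sides as a map over the same key list
  have hA : (ord.map fun n => (n, sheLastv n urls)) ++ missing.map (fun k => (k, ""))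
      = (ord ++ missing).map (fun n => (n, if n ∈ ord then sheLastv n urls else "")) := by
    rw [List.map_append]
    congr 1
    · apply (List.map_congr_left ?_).symm
      intro n hn
      simp [hn]
    · apply (List.map_congr_left ?_).symm
      intro n hn
      have hno : ¬ n ∈ ord := by
        have := List.of_mem_filter hn
        simp only [hcont, Bool.not_eq_true', decide_eq_false_iff_not] at this
        exact this
      simp [hno]
  rw [hA, hkeyord]
  -- per-name: A's value is the last forward match, B's the first backward match
  have hvals : ∀ n ∈ sheNames,
      (if n ∈ ord then sheLastv n urls else "")
        = ((urls.reverse.find? (fun u => PySem.Str.isIn (sheDomOf n) u)).getD "") := by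
    intro n hn
    rw [she_find_reverse]
    by_cases hno : n ∈ ord
    · simp [hno, sheLastv]
    · have hnomatch : ∀ u ∈ urls, ¬ PySem.Str.isIn (sheDomOf n) u = true := by
        intro u hu hm
        exact hno ((she_mem_ord n urls).2 ⟨u, hu, (she_matched_iff u n hn).2 hm⟩)
      have hfilter : urls.filter (fun u => PySem.Str.isIn (sheDomOf n) u) = [] := by
        rw [List.filter_eq_nil_iff]
        exact hnomatch
      rw [hfilter]
      simp [hno]
  have h0 := hvals "facebook" (by decide)
  have h1 := hvals "twitter" (by decide)
  have h2 := hvals "linkedin" (by decide)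
  have h3 := hvals "instagram" (by decide)
  rw [she_domOf_eq.1] at h0
  rw [she_domOf_eq.2.1] at h1
  rw [she_domOf_eq.2.2.1] at h2
  rw [she_domOf_eq.2.2.2] at h3
  simp only [sheNames, sheAltPlatforms, List.map_cons, List.map_nil]
  rw [h0, h1, h2, h3]
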